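-- pv_equiv track=rewrite | github.com/etheodoridou/CodeU_Assignments | assignment1/Exercise1.py | string_to_dict_english
-- ===== SOURCE A (Python) =====
-- from string import ascii_lowercase
--
-- def string_to_dict_english(input_string):
--     lower_case_string = input_string.lower()
--
--     dictionary = {}
--
--     for alphabet in ascii_lowercase:
--         dictionary[alphabet] = 0
--
--     for character in lower_case_string:
--         if character in dictionary:
--             dictionary[character] = dictionary.get(character) + 1
--         else:
--             return {}
--
--     return dictionary
-- ===== SOURCE B (Python) =====
-- from string import ascii_lowercase
--
--
-- def string_to_dict_english(input_string):
--     s = input_string.lower()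
--     if not set(s) <= set(ascii_lowercase):
--         return {}
--     return {c: s.count(c) for c in ascii_lowercase}
-- ===== Notes on version B (the rewrite author's own statement) =====
-- stated objective: idiomatic
-- what changed: A mutates a pre-seeded dict one character at a time with an early return inside the loop; B validates once with a set-inclusion test (set(s) <= set(ascii_lowercase)) and then builds the result in one comprehension via per-letter str.count, with no mutation and no early return.
import Mathlib
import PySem

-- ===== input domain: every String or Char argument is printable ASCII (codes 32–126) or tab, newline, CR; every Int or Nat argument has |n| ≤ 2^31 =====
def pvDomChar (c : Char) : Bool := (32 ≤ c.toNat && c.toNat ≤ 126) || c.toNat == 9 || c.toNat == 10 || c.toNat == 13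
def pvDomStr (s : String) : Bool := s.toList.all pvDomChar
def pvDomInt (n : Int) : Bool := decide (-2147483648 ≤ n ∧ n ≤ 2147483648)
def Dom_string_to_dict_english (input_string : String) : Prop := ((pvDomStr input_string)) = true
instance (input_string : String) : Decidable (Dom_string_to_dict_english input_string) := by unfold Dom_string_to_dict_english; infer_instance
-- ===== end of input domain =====

-- B replaces A's mutate-a-seeded-dict loop with early return by a one-shot set-inclusion
-- validation followed by a per-letter count comprehension (idiomatic, same cost).

-- ===== PORT A =====
-- ascii_lowercase
def pvAbc : List Char := "abcdefghijklmnopqrstuvwxyz".toList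

-- the 'for character in lower_case_string' loop with its early 'return {}';
-- 'dictionary[character] = dictionary.get(character) + 1' is exact here because the
-- branch guarantees the key is present (get returns that value, never None)
def pvLoopA : List Char → PySem.Dict String Int → List (String × Int)
  | [], d => d.items
  | c :: cs, d =>
      if d.contains (String.ofList [c]) then
        pvLoopA cs (d.insert (String.ofList [c]) (d.getD (String.ofList [c]) 0 + 1))
      else []

def string_to_dict_english (input_string : String) : List (String × Int) :=
  let lower_case_string := (PySem.Str.lower input_string).toList
  let dictionary := pvAbc.foldl (fun d c => d.insert (String.ofList [c]) (0 : Int)) PySem.Dict.empty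
  pvLoopA lower_case_string dictionary

-- ===== PORT B =====
def string_to_dict_english_alt (input_string : String) : List (String × Int) :=
  -- set(s) <= set(ascii_lowercase), with s = input_string.lower()
  if (PySem.Set.ofList (PySem.Str.lower input_string).toList).all
      (fun c => (PySem.Set.ofList pvAbc).contains c) then
    -- {c: s.count(c) for c in ascii_lowercase}  (s.count on a 1-char needle = char count)
    pvAbc.map (fun c => (String.ofList [c], ((PySem.Str.lower input_string).toList.count c : Int)))
  else []

-- ===== PRECONDITION & SPEC =====
def Spec_string_to_dict_english (input_string : String) (out : List (String × Int)) : Prop := out = string_to_dict_english_alt input_string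
instance (input_string : String) (out : List (String × Int)) : Decidable (Spec_string_to_dict_english input_string out) := by unfold Spec_string_to_dict_english; infer_instance

-- ===== CLAIM (what is proved, stated in full; the proofs are below) =====
def Claim_equal_string_to_dict_english : Prop := ∀ (input_string : String), Dom_string_to_dict_english input_string → Spec_string_to_dict_english input_string (string_to_dict_english input_string)

-- ===== LEMMAS AND PROOFS =====

def pvMk1 (c : Char) : String := String.ofList [c]

theorem pvMk1_inj : Function.Injective pvMk1 := by
  intro a b h
  have := congrArg String.toList (show String.ofList [a] = String.ofList [b] from h)
  simp at this
  exact this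

-- A's seeded dictionary, in closed form
def pvD0 : PySem.Dict String Int :=
  pvAbc.foldl (fun d c => d.insert (String.ofList [c]) (0 : Int)) PySem.Dict.empty

theorem pvD0_eq : pvD0 = PySem.Dict.mk (pvAbc.map (fun c => (pvMk1 c, (0 : Int)))) := by
  decide

theorem pvD0_keys : pvD0.keys = pvAbc.map pvMk1 := by decide

theorem pvD0_keys_nodup : pvD0.keys.Nodup := by decide

theorem pvD0_contains (c : Char) : pvD0.contains (pvMk1 c) = decide (c ∈ pvAbc) := by
  rw [PySem.Dict.contains_eq_decide_mem_keys, pvD0_keys]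
  simp [List.mem_map, pvMk1_inj.eq_iff]

theorem pvD0_getD (c : Char) (h : c ∈ pvAbc) : pvD0.getD (pvMk1 c) 0 = 0 := by
  apply PySem.Dict.getD_of_mem_items (d := pvD0)
  · rw [pvD0_eq]
    simpa using List.mem_map_of_mem (f := fun c => (pvMk1 c, (0:Int))) h
  · exact pvD0_keys_nodup

-- characterisation of A's loop from any dictionary state
theorem pvLoopA_spec (cs : List Char) (d : PySem.Dict String Int) :
    pvLoopA cs d =
      if cs.all (fun c => d.contains (String.ofList [c])) then
        ((cs.map pvMk1).foldl (fun d x => d.insert x (d.getD x 0 + 1)) d).items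
      else [] := by
  induction cs generalizing d with
  | nil => simp [pvLoopA]
  | cons c cs ih =>
      by_cases h : d.contains (String.ofList [c]) = true
      · rw [pvLoopA, if_pos h, ih]
        have hall : (cs.all fun c' => (d.insert (String.ofList [c]) (d.getD (String.ofList [c]) 0 + 1)).contains (String.ofList [c']))
            = (cs.all fun c' => d.contains (String.ofList [c'])) := by
          apply Bool.eq_iff_iff.mpr
          simp only [List.all_eq_true]
          refine forall₂_congr (fun x hx => ?_)
          rw [PySem.Dict.contains_insert]
          constructor
          · intro hor
            rcases Bool.or_eq_true_iff.mp hor with hx' | hb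
            · rw [eq_of_beq hx']; exact h
            · exact hb
          · intro hb; rw [hb, Bool.or_true]
        rw [hall]
        simp [List.all_cons, h, pvMk1]
      · rw [pvLoopA, if_neg h]
        have : ((c :: cs).all fun c' => d.contains (String.ofList [c'])) = false := by
          simp [List.all_cons, Bool.eq_false_iff.mp (by simpa using h)]
        simp [this]

-- the two validity tests agree
theorem pvCond_eq (ls : List Char) :
    ((PySem.Set.ofList ls).all (fun c => (PySem.Set.ofList pvAbc).contains c))
      = (ls.all (fun c => pvD0.contains (String.ofList [c]))) := by
  have habc : PySem.Set.ofList pvAbc = pvAbc := by decide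
  apply Bool.eq_iff_iff.mpr
  simp only [List.all_eq_true, habc]
  constructor
  · intro h c hc
    have := h c (by simpa [PySem.Set.mem_ofList] using hc)
    have hmem : c ∈ pvAbc := by simpa using this
    show pvD0.contains (pvMk1 c) = true
    simp [pvD0_contains, hmem]
  · intro h c hc
    have hc' : c ∈ ls := by simpa [PySem.Set.mem_ofList] using hc
    have := h c hc'
    have hmem : c ∈ pvAbc := by
      have := pvD0_contains c ▸ (show pvD0.contains (pvMk1 c) = true from this)
      simpa using this
    simpa using hmem

-- ===== VERDICT (by name: the statement is the Claim_ definition above) =====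
theorem string_to_dict_english_spec : Claim_equal_string_to_dict_english := by
  intro input_string _
  unfold Spec_string_to_dict_english string_to_dict_english string_to_dict_english_alt
  set ls := (PySem.Str.lower input_string).toList with hls
  show pvLoopA ls pvD0 = _
  rw [pvLoopA_spec, pvCond_eq]
  by_cases h : (ls.all fun c => pvD0.contains (String.ofList [c])) = true
  · rw [if_pos h, if_pos h]
    have hmem : ∀ c ∈ ls, c ∈ pvAbc := by
      intro c hc
      have := (List.all_eq_true.mp h) c hc
      have : pvD0.contains (pvMk1 c) = true := by simpa using this
      simpa [pvD0_contains] using this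
    set F := ((ls.map pvMk1).foldl (fun d x => d.insert x (d.getD x 0 + 1)) pvD0) with hF
    have hkeys : F.keys = pvAbc.map pvMk1 := by
      rw [hF, PySem.Dict.keys_foldl_insert, pvD0_keys]
      rw [PySem.Set.update_eq_append_filter]
      have hnil : (PySem.Set.ofList (ls.map pvMk1)).filter
          (fun y => !(PySem.Set.contains (pvAbc.map pvMk1) y)) = [] := by
        apply List.filter_eq_nil_iff.mpr
        intro y hy
        have : y ∈ ls.map pvMk1 := by simpa [PySem.Set.mem_ofList] using hy
        obtain ⟨c, hc, rfl⟩ := List.mem_map.mp this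
        have hm : pvMk1 c ∈ pvAbc.map pvMk1 := List.mem_map_of_mem (hmem c hc)
        simp [PySem.Set.contains, hm]
      rw [hnil, List.append_nil]
    have hnd : F.keys.Nodup := by
      rw [hF]; exact PySem.Dict.nodup_keys_foldl_insert _ _ _ pvD0_keys_nodup
    rw [PySem.Dict.items_eq_map_keys F hnd 0, hkeys, List.map_map]
    apply List.map_congr_left
    intro c hc
    simp only [Function.comp]
    have hget : F.getD (pvMk1 c) 0 = pvD0.getD (pvMk1 c) 0 + (ls.map pvMk1).count (pvMk1 c) := by
      rw [hF]; exact PySem.Dict.getD_foldl_insert_add_one _ _ _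
    rw [hget, pvD0_getD c hc, List.count_map_of_injective _ _ pvMk1_inj]
    simp [pvMk1]
  · rw [if_neg h, if_neg h]
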